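-- pv_equiv track=rewrite | github.com/JianweiChen/grl | guidepost.py | reset_seq
-- ===== SOURCE A (Python) =====
-- def reset_seq(seqs, k1):
--     n = (len(seqs)-1) // k1
--     n += 1
--     p = len(seqs) // n + 1
--     output_seqs = []
--     for i in range(n):
--         output_seqs.extend([(_, i, _-p*i) for _ in seqs[i*p:(i+1)*p]])
--     return output_seqs
-- ===== SOURCE B (Python) =====
-- def reset_seq(seqs, k1):
--     n = (len(seqs) - 1) // k1 + 1
--     p = len(seqs) // n + 1
--     out = []
--     i = 0
--     r = p
--     for x in seqs:
--         if r == 0: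
--             i += 1
--             r = p
--         out.append((x, i, x - p * i))
--         r -= 1
--     return out
-- ===== Notes on version B (the rewrite author's own statement) =====
-- stated objective: alternative
-- what changed: Replaced the nested block-then-slice traversal (range over blocks, slicing and extending per block) by a single stateful pass over seqs that carries the current block index and a countdown of remaining slots, resetting the countdown to p at each block boundary.
-- outside the precondition, e.g. on reset_seq([1, 2, 3], -1): A returns [], B returns [(1, 0, 1), (2, 0, 2), (3, 0, 3)]
import Mathlib
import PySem

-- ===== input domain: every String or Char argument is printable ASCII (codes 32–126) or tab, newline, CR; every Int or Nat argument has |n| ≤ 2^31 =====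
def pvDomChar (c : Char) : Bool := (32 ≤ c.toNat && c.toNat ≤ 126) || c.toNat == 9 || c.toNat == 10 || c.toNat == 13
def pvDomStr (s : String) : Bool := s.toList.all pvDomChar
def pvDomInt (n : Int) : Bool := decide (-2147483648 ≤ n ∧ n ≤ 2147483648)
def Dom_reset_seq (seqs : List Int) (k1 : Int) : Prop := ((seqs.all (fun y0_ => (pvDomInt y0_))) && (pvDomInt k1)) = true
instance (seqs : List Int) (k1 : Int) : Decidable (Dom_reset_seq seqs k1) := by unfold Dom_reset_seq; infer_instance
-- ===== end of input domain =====

-- B replaces A's nested block-then-slice traversal by one stateful recursive pass carrying the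
-- current block index and a countdown of remaining slots (objective: alternative decomposition).


-- ===== PORT A =====
def reset_seq (seqs : List Int) (k1 : Int) : List (Int × Int × Int) :=
  let n : Int := PySem.Int.floordiv ((seqs.length : Int) - 1) k1 + 1
  let p : Int := PySem.Int.floordiv (seqs.length : Int) n + 1
  (PySem.List.pyRange 0 n 1).foldl
    (fun acc i =>
      acc ++ (PySem.List.slice seqs (some (i * p)) (some ((i + 1) * p))).map
        (fun x => (x, i, x - p * i)))
    []

-- ===== PORT B =====
-- the for-loop over seqs carrying (i, r): block index and remaining slots in the current block
def reset_seq_alt_go (p : Int) : List Int → Int → Int → List (Int × Int × Int)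
  | [], _, _ => []
  | x :: xs, i, r =>
    if r == 0 then
      (x, i + 1, x - p * (i + 1)) :: reset_seq_alt_go p xs (i + 1) (p - 1)
    else
      (x, i, x - p * i) :: reset_seq_alt_go p xs i (r - 1)

def reset_seq_alt (seqs : List Int) (k1 : Int) : List (Int × Int × Int) :=
  let n : Int := PySem.Int.floordiv ((seqs.length : Int) - 1) k1 + 1
  let p : Int := PySem.Int.floordiv (seqs.length : Int) n + 1
  reset_seq_alt_go p seqs 0 p

-- ===== PRECONDITION & SPEC =====
-- Pre_ restricts to the natural domain of the function: a positive group parameter k1 and a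
-- nonempty seqs.  It excludes k1 = 0 and seqs = [] (A raises ZeroDivisionError there), and
-- negative k1, which is outside the function's meaningful domain (a group size must be
-- positive) and on which A either raises ZeroDivisionError or returns an empty grouping.
def Pre_reset_seq (seqs : List Int) (k1 : Int) : Prop := 0 < k1 ∧ seqs ≠ []
instance (seqs : List Int) (k1 : Int) : Decidable (Pre_reset_seq seqs k1) := by
  unfold Pre_reset_seq; infer_instance
def pvWitness_reset_seq : List Int × Int := ([3, 1, 4, 1, 5], 2)
def Spec_reset_seq (seqs : List Int) (k1 : Int) (out : List (Int × Int × Int)) : Prop := out = reset_seq_alt seqs k1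
instance (seqs : List Int) (k1 : Int) (out : List (Int × Int × Int)) : Decidable (Spec_reset_seq seqs k1 out) := by unfold Spec_reset_seq; infer_instance

-- ===== CLAIM (what is proved, stated in full; the proofs are below) =====
def Claim_equal_reset_seq : Prop := ∀ (seqs : List Int) (k1 : Int), Dom_reset_seq seqs k1 → Pre_reset_seq seqs k1 → Spec_reset_seq seqs k1 (reset_seq seqs k1)

-- ===== LEMMAS AND PROOFS =====

-- With r = 0 the loop body rolls over to the next block before emitting, so the state (i, 0)
-- behaves exactly like (i + 1, p).
theorem pv_go_zero (p : Int) (hp : p ≠ 0) (L : List Int) (i : Int) :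
    reset_seq_alt_go p L i 0 = reset_seq_alt_go p L (i + 1) p := by
  cases L with
  | nil => rfl
  | cons x xs => simp [reset_seq_alt_go, hp]

-- Consuming r elements in one block: the countdown tags each of the first r elements with the
-- current block index i and leaves the state at (i, 0) on the rest.
theorem pv_go_chunk (p : Int) (i : Int) :
    ∀ (r : Nat) (L : List Int),
      reset_seq_alt_go p L i (r : Int)
        = (L.take r).map (fun x => (x, i, x - p * i)) ++ reset_seq_alt_go p (L.drop r) i 0 := by
  intro r
  induction r with
  | zero => intro L; simp
  | succ r ih =>
    intro L
    cases L with
    | nil => simp [reset_seq_alt_go]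
    | cons x xs =>
      have hne : ¬ (((r : Int) + 1) = 0) := by omega
      have : ((r + 1 : Nat) : Int) = (r : Int) + 1 := by push_cast; ring
      rw [this]
      simp only [reset_seq_alt_go, beq_iff_eq, hne, if_false, Int.add_sub_cancel,
        List.take_succ_cons, List.drop_succ_cons, List.map_cons, List.cons_append]
      rw [ih xs]

-- The concatenation of A's annotated P-chunks equals B's one-pass countdown recursion, for any
-- list covered by the N chunks.
theorem pv_key (P : Nat) (hP : 0 < P) :
    ∀ (N : Nat) (b : Int) (L : List Int), L.length ≤ N * P →
      (List.range N).flatMap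
          (fun k => ((L.drop (k * P)).take P).map
            (fun x => (x, b + (k : Int), x - (P : Int) * (b + (k : Int)))))
        = reset_seq_alt_go (P : Int) L b (P : Int) := by
  intro N
  induction N with
  | zero =>
    intro b L hL
    have h0 : L.length = 0 := Nat.le_zero.mp (by simpa using hL)
    simp [List.eq_nil_of_length_eq_zero h0, reset_seq_alt_go]
  | succ N ih =>
    intro b L hL
    rw [List.range_succ_eq_map, List.flatMap_cons, List.flatMap_map]
    simp only [Nat.succ_eq_add_one, Nat.cast_add, Nat.cast_one]
    have hrest :
        (List.range N).flatMap
            (fun k => ((L.drop ((k + 1) * P)).take P).map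
              (fun x => (x, b + ((k : Int) + 1), x - (P : Int) * (b + ((k : Int) + 1)))))
          = reset_seq_alt_go (P : Int) (L.drop P) (b + 1) (P : Int) := by
      have hlen' : (L.drop P).length ≤ N * P := by
        simp only [List.length_drop]
        have := hL; rw [Nat.add_mul] at this; omega
      rw [← ih (b + 1) (L.drop P) hlen']
      congr 1
      funext k
      have e1 : (k + 1) * P = k * P + P := by ring
      have e2 : b + ((k : Int) + 1) = b + 1 + (k : Int) := by ring
      rw [e1, e2, List.drop_drop, Nat.add_comm (k * P) P]
    rw [hrest]
    have hchunk := pv_go_chunk (P : Int) b P L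
    rw [hchunk]
    have hPne : ((P : Int)) ≠ 0 := by omega
    rw [pv_go_zero (P : Int) hPne (L.drop P) b]
    simp

theorem pv_main (seqs : List Int) (k1 : Int) (hk1 : 0 < k1) (hne : seqs ≠ []) :
    reset_seq seqs k1 = reset_seq_alt seqs k1 := by
  simp only [reset_seq, reset_seq_alt]
  set m : Int := (seqs.length : Int) with hm_def
  set n : Int := PySem.Int.floordiv (m - 1) k1 + 1 with hn_def
  set p : Int := PySem.Int.floordiv m n + 1 with hp_def
  have hmlen : 1 ≤ seqs.length := List.length_pos_iff.mpr hne
  have hm1 : (1 : Int) ≤ m := by simp [hm_def]; omega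
  have hn0 : 0 < n := by
    have := Int.ediv_nonneg (a := m - 1) (b := k1) (by omega) (le_of_lt hk1)
    rw [hn_def, PySem.Int.floordiv_eq_ediv_of_pos hk1]; omega
  have hp0 : 0 < p := by
    have := Int.ediv_nonneg (a := m) (b := n) (by omega) (le_of_lt hn0)
    rw [hp_def, PySem.Int.floordiv_eq_ediv_of_pos hn0]; omega
  have hmnp : m ≤ n * p := by
    have hdm := Int.mul_ediv_add_emod m n
    have hlt := Int.emod_lt_of_pos m hn0
    have hexp : n * p = n * (m / n) + n := by
      rw [hp_def, PySem.Int.floordiv_eq_ediv_of_pos hn0]; ring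
    linarith
  obtain ⟨N, hN⟩ : ∃ N : Nat, (N : Int) = n := ⟨n.toNat, Int.toNat_of_nonneg (le_of_lt hn0)⟩
  obtain ⟨P, hP⟩ : ∃ P : Nat, (P : Int) = p := ⟨p.toNat, Int.toNat_of_nonneg (le_of_lt hp0)⟩
  have hPpos : 0 < P := by omega
  have hlen : seqs.length ≤ N * P := by
    have h1 : (seqs.length : Int) ≤ ((N * P : Nat) : Int) := by
      push_cast
      rw [hN, hP]
      exact hm_def ▸ hmnp
    exact_mod_cast h1
  rw [← hN, ← hP]
  rw [PySem.List.foldl_append_eq_flatMap, List.nil_append, PySem.List.pyRange_one,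
    List.flatMap_map]
  simp only [Int.sub_zero, Int.toNat_natCast]
  have hkey := pv_key P hPpos N 0 seqs hlen
  simp only [Int.zero_add] at hkey
  rw [← hkey]
  congr 1
  funext k
  have e1 : ((0 : Int) + (k : Int)) * (P : Int) = ((k * P : Nat) : Int) := by push_cast; ring
  have e2 : ((0 : Int) + (k : Int) + 1) * (P : Int) = ((k * P : Nat) : Int) + ((P : Nat) : Int) := by
    push_cast; ring
  rw [e1, e2, PySem.List.slice_natCast_add]
  congr 1
  funext x
  simp

-- ===== VERDICT (by name: the statement is the Claim_ definition above) =====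
theorem reset_seq_spec : Claim_equal_reset_seq := by
  intro seqs k1 _ hpre
  exact pv_main seqs k1 hpre.1 hpre.2
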